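-- pv_equiv track=rewrite | github.com/MajdTaweel/document-segmentation | multilevel_classifier.py | __get_regions_bounding_rects
-- ===== SOURCE A (Python) =====
-- def __get_regions_bounding_rects(splits, uppers, lowers, w, h, vertical=False):
--     bounding_rects = []
--     if vertical:
--         for i in range(len(splits)):
--             if i == 0:
--                 bounding_rects.append((
--                     0,
--                     0,
--                     lowers[splits[i]] +
--                     int((uppers[splits[i] + 1] - lowers[splits[i]]) / 2),
--                     h
--                 ))
--             if i == len(splits) - 1:
--                 bounding_rects.append((
--                     lowers[splits[i]] +
--                     int((uppers[splits[i] + 1] - lowers[splits[i]]) / 2),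
--                     0,
--                     w,
--                     h
--                 ))
--             else:
--                 bounding_rects.append((
--                     lowers[splits[i]] +
--                     int((uppers[splits[i] + 1] - lowers[splits[i]]) / 2),
--                     0,
--                     lowers[splits[i + 1]] +
--                     int((uppers[splits[i + 1] + 1] -
--                          lowers[splits[i + 1]]) / 2),
--                     h
--                 ))
--     else:
--         for i in range(len(splits)):
--             if i == 0:
--                 bounding_rects.append((
--                     0,
--                     0,
--                     w,
--                     lowers[splits[i]] +
--                     int((uppers[splits[i] + 1] - lowers[splits[i]]) / 2)
--                 ))
--             if i == len(splits) - 1: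
--                 bounding_rects.append((
--                     0,
--                     lowers[splits[i]] +
--                     int((uppers[splits[i] + 1] - lowers[splits[i]]) / 2),
--                     w,
--                     h
--                 ))
--             else:
--                 bounding_rects.append((
--                     0,
--                     lowers[splits[i]] +
--                     int((uppers[splits[i] + 1] - lowers[splits[i]]) / 2),
--                     w,
--                     lowers[splits[i + 1]] +
--                     int((uppers[splits[i + 1] + 1] -
--                          lowers[splits[i + 1]]) / 2)
--                 ))
--     return bounding_rects
-- ===== SOURCE B (Python) =====
-- def __get_regions_bounding_rects(splits, uppers, lowers, w, h, vertical=False):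
--     if not splits:
--         return []
--     mids = [lowers[s] + int((uppers[s + 1] - lowers[s]) / 2) for s in splits]
--     bounds = [0] + mids + [w if vertical else h]
--     if vertical:
--         return [(a, 0, b, h) for a, b in zip(bounds, bounds[1:])]
--     return [(0, a, w, b) for a, b in zip(bounds, bounds[1:])]
-- ===== Notes on version B (the rewrite author's own statement) =====
-- stated objective: simpler
-- what changed: Replaces A's index loop with first/last branch tests by building the midpoint boundary table [0] + mids + [w or h] once and emitting one rectangle per consecutive pair.
import Mathlib
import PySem

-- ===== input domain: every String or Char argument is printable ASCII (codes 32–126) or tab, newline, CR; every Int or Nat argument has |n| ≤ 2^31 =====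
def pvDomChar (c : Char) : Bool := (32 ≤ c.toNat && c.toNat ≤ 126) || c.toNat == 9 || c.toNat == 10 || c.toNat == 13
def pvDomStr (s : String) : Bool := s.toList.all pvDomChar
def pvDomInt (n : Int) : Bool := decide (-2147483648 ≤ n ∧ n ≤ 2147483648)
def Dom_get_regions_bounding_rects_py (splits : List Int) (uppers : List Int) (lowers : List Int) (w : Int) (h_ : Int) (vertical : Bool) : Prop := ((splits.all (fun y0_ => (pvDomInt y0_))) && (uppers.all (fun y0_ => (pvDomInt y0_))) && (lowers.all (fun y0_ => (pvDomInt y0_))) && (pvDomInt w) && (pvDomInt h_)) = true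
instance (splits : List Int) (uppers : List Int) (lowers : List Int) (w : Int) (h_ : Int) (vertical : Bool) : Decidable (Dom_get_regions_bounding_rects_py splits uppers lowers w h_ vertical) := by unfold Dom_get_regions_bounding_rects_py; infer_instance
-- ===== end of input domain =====

-- B replaces A's per-index branch loop by a boundary table ([0] ++ midpoints ++ [w|h]) mapped
-- over consecutive pairs (objective: simpler). Same values; 'int((u-l)/2)' is exact on Dom (|ints| ≤ 2^31 < 2^53).

-- ===== PORT A =====
-- A-side helper: the repeated midpoint expression 'lowers[s] + int((uppers[s+1] - lowers[s]) / 2)'.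
-- PySem.Int.truncdiv is exact for int(x/2) here since |values| ≤ 2^32 < 2^53 on Dom; pyGetD's
-- default 0 is never used under Pre_ (indices in range).
def pvMidA (uppers lowers : List Int) (s : Int) : Int :=
  PySem.List.pyGetD lowers s 0 +
    PySem.Int.truncdiv (PySem.List.pyGetD uppers (s + 1) 0 - PySem.List.pyGetD lowers s 0) 2

def get_regions_bounding_rects_py (splits : List Int) (uppers : List Int) (lowers : List Int) (w : Int) (h_ : Int) (vertical : Bool) : List (Int × Int × Int × Int) :=
  if vertical then
    (List.range splits.length).foldl (fun (acc : List (Int × Int × Int × Int)) (i : Nat) =>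
      let acc := if i = 0 then
          acc ++ [(0, 0, pvMidA uppers lowers (PySem.List.pyGetD splits (i : Int) 0), h_)]
        else acc
      if i = splits.length - 1 then
        acc ++ [(pvMidA uppers lowers (PySem.List.pyGetD splits (i : Int) 0), 0, w, h_)]
      else
        acc ++ [(pvMidA uppers lowers (PySem.List.pyGetD splits (i : Int) 0), 0,
                 pvMidA uppers lowers (PySem.List.pyGetD splits ((i : Int) + 1) 0), h_)]) []
  else
    (List.range splits.length).foldl (fun (acc : List (Int × Int × Int × Int)) (i : Nat) =>
      let acc := if i = 0 then
          acc ++ [(0, 0, w, pvMidA uppers lowers (PySem.List.pyGetD splits (i : Int) 0))]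
        else acc
      if i = splits.length - 1 then
        acc ++ [(0, pvMidA uppers lowers (PySem.List.pyGetD splits (i : Int) 0), w, h_)]
      else
        acc ++ [(0, pvMidA uppers lowers (PySem.List.pyGetD splits (i : Int) 0), w,
                 pvMidA uppers lowers (PySem.List.pyGetD splits ((i : Int) + 1) 0))]) []

-- ===== PORT B =====
-- B-side helper: the same midpoint expression, computed once per split.
def pvMidB (uppers lowers : List Int) (s : Int) : Int :=
  PySem.List.pyGetD lowers s 0 +
    PySem.Int.truncdiv (PySem.List.pyGetD uppers (s + 1) 0 - PySem.List.pyGetD lowers s 0) 2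

def get_regions_bounding_rects_py_alt (splits : List Int) (uppers : List Int) (lowers : List Int) (w : Int) (h_ : Int) (vertical : Bool) : List (Int × Int × Int × Int) :=
  if splits = [] then []
  else
    let mids := splits.map (fun s => pvMidB uppers lowers s)
    let bounds := 0 :: mids ++ [if vertical then w else h_]
    if vertical then
      (bounds.zip bounds.tail).map (fun p => (p.1, 0, p.2, h_))
    else
      (bounds.zip bounds.tail).map (fun p => (0, p.1, w, p.2))

-- ===== PRECONDITION & SPEC =====
-- Pre_: exactly the inputs where Python A returns (no IndexError): every split index (Python
-- semantics, negative = from the end) is valid into lowers and its successor valid into uppers.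
def Pre_get_regions_bounding_rects_py (splits : List Int) (uppers : List Int) (lowers : List Int) (w : Int) (h_ : Int) (vertical : Bool) : Prop :=
  ∀ s ∈ splits, PySem.Raise.InRange lowers.length s ∧ PySem.Raise.InRange uppers.length (s + 1)
instance (splits : List Int) (uppers : List Int) (lowers : List Int) (w : Int) (h_ : Int) (vertical : Bool) : Decidable (Pre_get_regions_bounding_rects_py splits uppers lowers w h_ vertical) := by unfold Pre_get_regions_bounding_rects_py; infer_instance

def pvWitness_get_regions_bounding_rects_py : List Int × List Int × List Int × Int × Int × Bool :=
  ([0, 1], [3, 9, 20], [1, 7, 15], 40, 30, false)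

def Spec_get_regions_bounding_rects_py (splits : List Int) (uppers : List Int) (lowers : List Int) (w : Int) (h_ : Int) (vertical : Bool) (out : List (Int × Int × Int × Int)) : Prop := out = get_regions_bounding_rects_py_alt splits uppers lowers w h_ vertical
instance (splits : List Int) (uppers : List Int) (lowers : List Int) (w : Int) (h_ : Int) (vertical : Bool) (out : List (Int × Int × Int × Int)) : Decidable (Spec_get_regions_bounding_rects_py splits uppers lowers w h_ vertical out) := by unfold Spec_get_regions_bounding_rects_py; infer_instance

-- ===== CLAIM (what is proved, stated in full; the proofs are below) =====
def Claim_equal_get_regions_bounding_rects_py : Prop := ∀ (splits : List Int) (uppers : List Int) (lowers : List Int) (w : Int) (h_ : Int) (vertical : Bool), Dom_get_regions_bounding_rects_py splits uppers lowers w h_ vertical → Pre_get_regions_bounding_rects_py splits uppers lowers w h_ vertical → Spec_get_regions_bounding_rects_py splits uppers lowers w h_ vertical (get_regions_bounding_rects_py splits uppers lowers w h_ vertical)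

-- ===== LEMMAS AND PROOFS =====

-- The tail part of A's loop body, as a per-index block (first-rect part stripped off).
def pvTailBlock {α : Type} (m : Int → Int) (rect : Int → Int → α) (e : Int) (l : List Int) (i : Nat) : List α :=
  if i = l.length - 1 then [rect (m (PySem.List.pyGetD l (i : Int) 0)) e]
  else [rect (m (PySem.List.pyGetD l (i : Int) 0)) (m (PySem.List.pyGetD l ((i : Int) + 1) 0))]

-- T l = flatMap of the tail blocks; proved equal to B's consecutive-pairs map below.
lemma pvTail_eq_pairs {α : Type} (m : Int → Int) (rect : Int → Int → α) (e : Int) :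
    ∀ (l : List Int), l ≠ [] →
      (List.range l.length).flatMap (pvTailBlock m rect e l)
        = ((m <$> l ++ [e]).zip ((m <$> l ++ [e]).tail)).map (fun p => rect p.1 p.2) := by
  intro l
  induction l with
  | nil => intro h; exact absurd rfl h
  | cons a rest ih =>
    intro _
    cases rest with
    | nil => simp [pvTailBlock]
    | cons b t =>
      have hne : (b :: t : List Int) ≠ [] := by simp
      have hstep : ∀ i : Nat, pvTailBlock m rect e (a :: b :: t) (i + 1) = pvTailBlock m rect e (b :: t) i := by
        intro i
        have g1 : PySem.List.pyGetD (a :: b :: t) ((i + 1 : Nat) : Int) 0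
            = PySem.List.pyGetD (b :: t) ((i : Nat) : Int) 0 := by
          rw [PySem.List.pyGetD_natCast, PySem.List.pyGetD_natCast]; simp
        have g2 : PySem.List.pyGetD (a :: b :: t) (((i + 1 : Nat) : Int) + 1) 0
            = PySem.List.pyGetD (b :: t) (((i : Nat) : Int) + 1) 0 := by
          have h1 : (((i + 1 : Nat) : Int) + 1) = ((i + 2 : Nat) : Int) := by push_cast; ring
          have h2 : (((i : Nat) : Int) + 1) = ((i + 1 : Nat) : Int) := by push_cast; ring
          rw [h1, h2, PySem.List.pyGetD_natCast, PySem.List.pyGetD_natCast]; simp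
        simp only [pvTailBlock, List.length_cons, g1, g2]
        by_cases hi : i = t.length
        · rw [if_pos (by omega), if_pos (by omega)]
        · rw [if_neg (by omega), if_neg (by omega)]
      rw [List.length_cons, List.range_succ_eq_map, List.flatMap_cons, List.flatMap_map]
      have : (List.range (b :: t).length).flatMap (fun i => pvTailBlock m rect e (a :: b :: t) (i + 1))
          = (List.range (b :: t).length).flatMap (pvTailBlock m rect e (b :: t)) := by
        apply List.flatMap_congr
        intro i _
        exact hstep i
      rw [this, ih hne]
      have hblock0 : pvTailBlock m rect e (a :: b :: t) 0 = [rect (m a) (m b)] := by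
        simp only [pvTailBlock, List.length_cons]
        rw [if_neg (by omega)]
        simp [PySem.List.pyGetD_ofNat']
      rw [hblock0]
      simp [List.zip]

-- A's foldl body rewritten as 'acc ++ block i' where block i = (first-rect at i=0) ++ tail block.
lemma pvFoldl_body {α : Type} (m : Int → Int) (rect : Int → Int → α) (e : Int) (firstf : Nat → α) (l : List Int) :
    (fun (acc : List α) (i : Nat) =>
        let acc := if i = 0 then acc ++ [firstf i] else acc
        if i = l.length - 1 then acc ++ [rect (m (PySem.List.pyGetD l (i : Int) 0)) e]
        else acc ++ [rect (m (PySem.List.pyGetD l (i : Int) 0)) (m (PySem.List.pyGetD l ((i : Int) + 1) 0))])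
      = (fun acc i => acc ++ ((if i = 0 then [firstf i] else []) ++ pvTailBlock m rect e l i)) := by
  funext acc i
  simp only [pvTailBlock]
  split_ifs <;> simp

-- The whole generic loop: A's foldl equals B's consecutive-pairs map, for nonempty l.
lemma pvLoop_eq {α : Type} (m : Int → Int) (rect : Int → Int → α) (e : Int) (firstf : Nat → α) (l : List Int)
    (hl : l ≠ []) :
    (List.range l.length).foldl (fun (acc : List α) (i : Nat) =>
        let acc := if i = 0 then acc ++ [firstf i] else acc
        if i = l.length - 1 then acc ++ [rect (m (PySem.List.pyGetD l (i : Int) 0)) e]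
        else acc ++ [rect (m (PySem.List.pyGetD l (i : Int) 0)) (m (PySem.List.pyGetD l ((i : Int) + 1) 0))]) []
      = firstf 0 :: ((m <$> l ++ [e]).zip ((m <$> l ++ [e]).tail)).map (fun p => rect p.1 p.2) := by
  rw [pvFoldl_body]
  rw [PySem.List.foldl_append_eq_flatMap]
  obtain ⟨a, rest, rfl⟩ := List.exists_cons_of_ne_nil hl
  rw [List.length_cons, List.range_succ_eq_map, List.flatMap_cons, List.flatMap_map]
  simp only [List.nil_append]
  have : (List.range rest.length).flatMap
        (fun i => (if i + 1 = 0 then [firstf (i + 1)] else []) ++ pvTailBlock m rect e (a :: rest) (i + 1))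
      = (List.range rest.length).flatMap (fun i => pvTailBlock m rect e (a :: rest) (i + 1)) := by
    apply List.flatMap_congr; intro i _; simp
  rw [this]
  have hT := pvTail_eq_pairs m rect e (a :: rest) (by simp)
  rw [List.length_cons, List.range_succ_eq_map, List.flatMap_cons, List.flatMap_map] at hT
  rw [← hT]
  simp

lemma pvMidB_eq_pvMidA (uppers lowers : List Int) (s : Int) :
    pvMidB uppers lowers s = pvMidA uppers lowers s := rfl

-- ===== VERDICT (by name: the statement is the Claim_ definition above) =====
theorem get_regions_bounding_rects_py_spec : Claim_equal_get_regions_bounding_rects_py := by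
  intro splits uppers lowers w h_ vertical _ _
  unfold Spec_get_regions_bounding_rects_py
  unfold get_regions_bounding_rects_py get_regions_bounding_rects_py_alt
  rcases eq_or_ne splits ([] : List Int) with hnil | hne
  · subst hnil; cases vertical <;> simp
  · rw [if_neg hne]
    simp only [pvMidB_eq_pvMidA]
    cases vertical
    · simp only [Bool.false_eq_true, if_false]
      have := pvLoop_eq (pvMidA uppers lowers) (fun a b => ((0, a, w, b) : Int × Int × Int × Int)) h_
        (fun i => ((0, 0, w, pvMidA uppers lowers (PySem.List.pyGetD splits ((i : Nat) : Int) 0)) : Int × Int × Int × Int)) splits hne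
      simp only [Nat.cast_zero] at this
      refine this.trans ?_
      have hz : PySem.List.pyGetD splits (0 : Int) 0 = splits.headI := by
        obtain ⟨a, rest, rfl⟩ := List.exists_cons_of_ne_nil hne
        simp [PySem.List.pyGetD_ofNat']
      rw [hz]
      obtain ⟨a, rest, rfl⟩ := List.exists_cons_of_ne_nil hne
      simp [List.zip, List.map_eq_map]
    · rw [if_pos rfl]
      have := pvLoop_eq (pvMidA uppers lowers) (fun a b => ((a, 0, b, h_) : Int × Int × Int × Int)) w
        (fun i => ((0, 0, pvMidA uppers lowers (PySem.List.pyGetD splits ((i : Nat) : Int) 0), h_) : Int × Int × Int × Int)) splits hne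
      simp only [Nat.cast_zero] at this
      refine this.trans ?_
      have hz : PySem.List.pyGetD splits (0 : Int) 0 = splits.headI := by
        obtain ⟨a, rest, rfl⟩ := List.exists_cons_of_ne_nil hne
        simp [PySem.List.pyGetD_ofNat']
      rw [hz]
      obtain ⟨a, rest, rfl⟩ := List.exists_cons_of_ne_nil hne
      simp [List.zip, List.map_eq_map]
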